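-- pv_equiv track=rewrite | github.com/ntthienphuc/AlgorithmsBenchmark | core/validation.py | is_partitioned
-- ===== SOURCE A (Python) =====
-- def is_partitioned(A):
--     """Đúng nếu mọi số âm đứng trước mọi số dương và không có số 0."""
--     seen_pos = False
--     for x in A:
--         if x == 0:
--             return False
--         if x < 0:
--             if seen_pos:
--                 return False
--         else:
--             seen_pos = True
--     return True
-- ===== SOURCE B (Python) =====
-- def is_partitioned(A):
--     if 0 in A:
--         return False
--     negs = [x < 0 for x in A]
--     return all(a or not b for a, b in zip(negs, negs[1:]))
-- ===== Notes on version B (the rewrite author's own statement) =====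
-- stated objective: simpler
-- what changed: Replaces the incremental seen_pos state machine with a derived sign list checked for grouping: reject zeros up front, then require that no non-negative sign is immediately followed by a negative one (adjacent-pair check over negs and negs[1:]).
import Mathlib
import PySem

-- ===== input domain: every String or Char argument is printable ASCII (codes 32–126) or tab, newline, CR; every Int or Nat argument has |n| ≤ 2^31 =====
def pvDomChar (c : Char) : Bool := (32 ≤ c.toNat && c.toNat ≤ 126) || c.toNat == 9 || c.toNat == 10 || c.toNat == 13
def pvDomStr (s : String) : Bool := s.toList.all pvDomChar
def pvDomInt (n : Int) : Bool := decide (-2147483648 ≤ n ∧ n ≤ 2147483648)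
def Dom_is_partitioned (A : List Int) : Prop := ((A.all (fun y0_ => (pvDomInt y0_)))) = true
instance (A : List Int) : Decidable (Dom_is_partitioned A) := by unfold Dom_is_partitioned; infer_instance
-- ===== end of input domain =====

-- B replaces A's seen_pos state machine with a zero check plus an adjacent-pair
-- grouping check over the derived sign list (objective: simpler).

-- ===== PORT A =====
-- the for-loop with early returns, carrying seen_pos
def isPartitionedLoop : List Int → Bool → Bool
  | [], _ => true
  | x :: xs, seen_pos =>
    if x == 0 then false
    else if x < 0 then
      if seen_pos then false else isPartitionedLoop xs seen_pos
    else isPartitionedLoop xs true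

def is_partitioned (A : List Int) : Bool :=
  isPartitionedLoop A false

-- ===== PORT B =====
def is_partitioned_alt (A : List Int) : Bool :=
  if A.contains 0 then false
  else
    let negs := A.map (fun x => decide (x < 0))
    (negs.zip negs.tail).all (fun p => p.1 || !p.2)

-- ===== PRECONDITION & SPEC =====
def Spec_is_partitioned (A : List Int) (out : Bool) : Prop := out = is_partitioned_alt A
instance (A : List Int) (out : Bool) : Decidable (Spec_is_partitioned A out) := by unfold Spec_is_partitioned; infer_instance

-- ===== CLAIM (what is proved, stated in full; the proofs are below) =====
def Claim_equal_is_partitioned : Prop := ∀ (A : List Int), Dom_is_partitioned A → Spec_is_partitioned A (is_partitioned A)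

-- ===== LEMMAS AND PROOFS =====

-- adjacency check of B, in recursive form used only by the proofs
def pvAdj : List Bool → Bool
  | [] => true
  | [_] => true
  | a :: b :: t => (a || !b) && pvAdj (b :: t)

theorem pvAdj_zip (n : List Bool) : ∀ a : Bool,
    (((a :: n).zip n).all (fun p => p.1 || !p.2)) = pvAdj (a :: n) := by
  induction n with
  | nil => intro a; rfl
  | cons b m ih =>
    intro a
    simp only [List.zip, List.zipWith, List.all_cons, pvAdj]
    rw [← ih b]
    rfl

theorem pvAdj_false_cons (n : List Bool) : pvAdj (false :: n) = n.all (fun b => !b) := by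
  induction n with
  | nil => rfl
  | cons b m ih =>
    cases b with
    | false => simpa [pvAdj] using ih
    | true => simp [pvAdj]

theorem alt_zip_form (xs : List Int) :
    is_partitioned_alt xs =
      if xs.contains 0 then false
      else pvAdj (xs.map (fun x => decide (x < 0))) := by
  cases xs with
  | nil => rfl
  | cons x t =>
    unfold is_partitioned_alt
    simp only [List.map_cons, List.tail_cons]
    rw [pvAdj_zip]

theorem alt_cons_zero (xs : List Int) : is_partitioned_alt (0 :: xs) = false := by
  simp [is_partitioned_alt]

theorem alt_cons_neg (x : Int) (xs : List Int) (hn : x < 0) :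
    is_partitioned_alt (x :: xs) = is_partitioned_alt xs := by
  rw [alt_zip_form, alt_zip_form]
  have h0 : ((0 : Int) == x) = false := beq_eq_false_iff_ne.mpr (by omega)
  have hd : decide (x < 0) = true := decide_eq_true hn
  simp only [List.contains_cons, h0, Bool.false_or, List.map_cons, hd]
  cases hz : xs.contains 0
  · cases xs with
    | nil => rfl
    | cons y ys => simp [pvAdj]
  · rfl

theorem all_pos_split (xs : List Int) :
    xs.all (fun y => decide (0 < y)) =
      (!xs.contains 0 && xs.all (fun y => !decide (y < 0))) := by
  induction xs with
  | nil => rfl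
  | cons x t ih =>
    simp only [List.all_cons, List.contains_cons, Bool.not_or, ih]
    rcases lt_trichotomy x 0 with hn | h0 | hp
    · have e0 : ((0 : Int) == x) = false := beq_eq_false_iff_ne.mpr (by omega)
      have e1 : decide (0 < x) = false := decide_eq_false (by omega)
      have e2 : decide (x < 0) = true := decide_eq_true hn
      cases t.contains 0 <;> simp [e0, e1, e2]
    · subst h0; simp
    · have e0 : ((0 : Int) == x) = false := beq_eq_false_iff_ne.mpr (by omega)
      have e1 : decide (0 < x) = true := decide_eq_true hp
      have e2 : decide (x < 0) = false := decide_eq_false (by omega)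
      cases t.contains 0 <;> simp [e0, e1, e2]

theorem alt_cons_pos (x : Int) (xs : List Int) (hp : 0 < x) :
    is_partitioned_alt (x :: xs) = xs.all (fun y => decide (0 < y)) := by
  rw [alt_zip_form]
  have h0 : ((0 : Int) == x) = false := beq_eq_false_iff_ne.mpr (by omega)
  have hd : decide (x < 0) = false := decide_eq_false (by omega)
  simp only [List.contains_cons, h0, Bool.false_or, List.map_cons, hd]
  rw [all_pos_split]
  cases hz : xs.contains 0
  · rw [pvAdj_false_cons, List.all_map]
    rfl
  · rfl

theorem loop_true_eq (xs : List Int) :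
    isPartitionedLoop xs true = xs.all (fun y => decide (0 < y)) := by
  induction xs with
  | nil => rfl
  | cons x t ih =>
    rcases lt_trichotomy x 0 with hn | h0 | hp
    · have he : (x == 0) = false := beq_eq_false_iff_ne.mpr (by omega)
      have h1 : decide (0 < x) = false := decide_eq_false (by omega)
      simp [isPartitionedLoop, hn, he, h1]
    · subst h0; simp [isPartitionedLoop]
    · have he : (x == 0) = false := beq_eq_false_iff_ne.mpr (by omega)
      have h2 : decide (0 < x) = true := decide_eq_true hp
      have h3 : decide (x < 0) = false := decide_eq_false (by omega)
      simp [isPartitionedLoop, he, ih, h2, h3]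

theorem loop_false_eq (xs : List Int) : isPartitionedLoop xs false = is_partitioned_alt xs := by
  induction xs with
  | nil => rfl
  | cons x t ih =>
    rcases lt_trichotomy x 0 with hn | h0 | hp
    · have he : (x == 0) = false := beq_eq_false_iff_ne.mpr (by omega)
      rw [alt_cons_neg x t hn, ← ih]
      simp [isPartitionedLoop, hn, he]
    · subst h0; simp [isPartitionedLoop, alt_cons_zero]
    · have he : (x == 0) = false := beq_eq_false_iff_ne.mpr (by omega)
      have h3 : decide (x < 0) = false := decide_eq_false (by omega)
      rw [alt_cons_pos x t hp, ← loop_true_eq]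
      simp only [isPartitionedLoop, he, Bool.false_eq_true, if_false]
      rw [if_neg (by omega : ¬ x < 0)]

-- ===== VERDICT (by name: the statement is the Claim_ definition above) =====
theorem is_partitioned_spec : Claim_equal_is_partitioned := by
  intro A _
  show is_partitioned A = is_partitioned_alt A
  exact loop_false_eq A
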